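-- pv_equiv track=rewrite | github.com/DaehyunYoo/Coding_study | 프로그래머스/2단계/기능개발.py | solution
-- ===== SOURCE A (Python) =====
-- from collections import Counter
-- from collections import Counter
--
-- def solution(progresses, speeds):
--     days = []
--     for i in range(len(speeds)):
--         if (100 - progresses[i]) % speeds[i] != 0:
--             days.append((100 - progresses[i]) // speeds[i] + 1)
--         else:
--             days.append((100 - progresses[i]) // speeds[i])
--
--     result = [days[0]]
--     for k in range(1, len(days)):
--         if result[-1] < days[k]:
--             result.append(days[k])
--         else:
--             result.append(result[-1])
--
--     count = Counter(result)
--     answer = list(count.values())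
--
--
--     return answer
-- ===== SOURCE B (Python) =====
-- def solution(progresses, speeds):
--     days = [(100 - p) // s + (1 if (100 - p) % s != 0 else 0)
--             for p, s in zip(progresses, speeds)]
--     front = days[0]
--     count = 1
--     answer = []
--     for d in days[1:]:
--         if d <= front:
--             count += 1
--         else:
--             answer.append(count)
--             front = d
--             count = 1
--     answer.append(count)
--     return answer
-- ===== Notes on version B (the rewrite author's own statement) =====
-- stated objective: simpler
-- what changed: B replaces A's prefix-maximum intermediate array plus Counter with a single grouping pass that keeps only the current group's front day and size, appending each finished group's size directly.
import Mathlib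
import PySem

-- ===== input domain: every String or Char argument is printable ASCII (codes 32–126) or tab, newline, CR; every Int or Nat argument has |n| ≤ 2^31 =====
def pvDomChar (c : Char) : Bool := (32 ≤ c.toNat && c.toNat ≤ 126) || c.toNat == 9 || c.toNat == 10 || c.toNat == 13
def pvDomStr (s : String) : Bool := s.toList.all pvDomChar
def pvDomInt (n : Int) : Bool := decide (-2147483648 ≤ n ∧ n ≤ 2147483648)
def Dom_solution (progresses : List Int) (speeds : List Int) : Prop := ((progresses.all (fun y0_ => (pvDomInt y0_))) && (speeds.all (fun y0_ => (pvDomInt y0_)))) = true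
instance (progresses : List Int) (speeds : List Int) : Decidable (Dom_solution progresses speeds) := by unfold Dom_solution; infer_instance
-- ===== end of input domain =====

-- B replaces A's prefix-maximum array + Counter with one grouping pass keeping only the current
-- group's front day and size (objective: simpler; same O(n) cost).


-- ===== PORT A =====
def solution (progresses : List Int) (speeds : List Int) : List Int :=
  let days := (PySem.List.pyRange 0 (PySem.List.len speeds)).foldl
    (fun days i =>
      if PySem.Int.mod (100 - PySem.List.pyGetD progresses i 0) (PySem.List.pyGetD speeds i 0) ≠ 0 then
        days ++ [PySem.Int.floordiv (100 - PySem.List.pyGetD progresses i 0) (PySem.List.pyGetD speeds i 0) + 1]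
      else
        days ++ [PySem.Int.floordiv (100 - PySem.List.pyGetD progresses i 0) (PySem.List.pyGetD speeds i 0)]) []
  let result := (PySem.List.pyRange 1 (PySem.List.len days)).foldl
    (fun result k =>
      if PySem.List.pyGetD result (-1) 0 < PySem.List.pyGetD days k 0 then
        result ++ [PySem.List.pyGetD days k 0]
      else
        result ++ [PySem.List.pyGetD result (-1) 0]) [PySem.List.pyGetD days 0 0]
  (PySem.Dict.counter result).values

-- ===== PORT B =====
def solution_alt (progresses : List Int) (speeds : List Int) : List Int :=
  let days := (progresses.zip speeds).map (fun ps =>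
    PySem.Int.floordiv (100 - ps.1) ps.2 + (if PySem.Int.mod (100 - ps.1) ps.2 ≠ 0 then 1 else 0))
  match days with
  | [] => []   -- 'days[0]' raises IndexError in Python here; excluded by Pre_solution
  | d0 :: rest =>
    let st := rest.foldl
      (fun (st : Int × Int × List Int) d =>
        if d ≤ st.1 then (st.1, st.2.1 + 1, st.2.2) else (d, 1, st.2.2 ++ [st.2.1]))
      (d0, 1, [])
    st.2.2 ++ [st.2.1]

-- ===== PRECONDITION & SPEC =====
-- Pre_ excludes exactly the inputs where A raises: empty speeds (days[0] → IndexError),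
-- a zero speed (ZeroDivisionError), and progresses shorter than speeds (IndexError).
def Pre_solution (progresses : List Int) (speeds : List Int) : Prop :=
  speeds ≠ [] ∧ speeds.length ≤ progresses.length ∧ ∀ s ∈ speeds, s ≠ 0
instance (progresses : List Int) (speeds : List Int) : Decidable (Pre_solution progresses speeds) := by
  unfold Pre_solution; infer_instance
def pvWitness_solution : List Int × List Int := ([93, 30, 55], [1, 30, 5])

def Spec_solution (progresses : List Int) (speeds : List Int) (out : List Int) : Prop := out = solution_alt progresses speeds
instance (progresses : List Int) (speeds : List Int) (out : List Int) : Decidable (Spec_solution progresses speeds out) := by unfold Spec_solution; infer_instance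

-- ===== CLAIM (what is proved, stated in full; the proofs are below) =====
def Claim_equal_solution : Prop := ∀ (progresses : List Int) (speeds : List Int), Dom_solution progresses speeds → Pre_solution progresses speeds → Spec_solution progresses speeds (solution progresses speeds)

-- ===== LEMMAS AND PROOFS =====

-- the per-task completion day (A's and B's formulas agree on it)
def pvDay (p s : Int) : Int :=
  PySem.Int.floordiv (100 - p) s + (if PySem.Int.mod (100 - p) s ≠ 0 then 1 else 0)

-- the prefix-maximum tail A's second loop builds (result = d0 :: pvPmax d0 rest)
def pvPmax : Int → List Int → List Int
  | _, [] => []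
  | m, d :: r => if m < d then d :: pvPmax d r else m :: pvPmax m r

-- the group sizes B's loop produces
def pvGrp : Int → Int → List Int → List Int
  | _, c, [] => [c]
  | m, c, d :: r => if d ≤ m then pvGrp m (c + 1) r else c :: pvGrp d 1 r

lemma pvPmax_ge (rest : List Int) : ∀ (m x : Int), x ∈ pvPmax m rest → m ≤ x := by
  induction rest with
  | nil => intro m x hx; simp [pvPmax] at hx
  | cons d r ih =>
    intro m x hx
    by_cases h : m < d
    · simp [pvPmax, h] at hx
      rcases hx with rfl | hx
      · exact le_of_lt h
      · exact le_of_lt (lt_of_lt_of_le h (ih d x hx))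
    · simp [pvPmax, h] at hx
      rcases hx with rfl | hx
      · exact le_refl _
      · exact ih m x hx

lemma pvFoldl_add_cons (L : List Int) : ∀ (a : Int) (s : List Int), a ∉ L → a ∉ s →
    L.foldl PySem.Set.add (a :: s) = a :: L.foldl PySem.Set.add s := by
  induction L with
  | nil => intro a s _ _; rfl
  | cons y t ih =>
    intro a s haL has
    have hya : y ≠ a := fun h => haL (by simp [h])
    have hstep : PySem.Set.add (a :: s) y = a :: PySem.Set.add s y := by
      by_cases hy : y ∈ s
      · simp [PySem.Set.add, PySem.Set.contains, hy]
      · simp [PySem.Set.add, PySem.Set.contains, hy, hya]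
    have haL' : a ∉ t := fun h => haL (by simp [h])
    have has' : a ∉ PySem.Set.add s y := by
      simp only [PySem.Set.add]
      split
      · exact has
      · intro h
        rcases List.mem_append.mp h with h | h
        · exact has h
        · simp at h; exact hya h.symm
    simp only [List.foldl_cons, hstep]
    exact ih a (PySem.Set.add s y) haL' has'

lemma pvFoldl_add_rep (c : Nat) (m : Int) :
    (List.replicate c m).foldl PySem.Set.add [m] = [m] := by
  induction c with
  | zero => rfl
  | succ c ih =>
    simp only [List.replicate_succ, List.foldl_cons]
    have h : PySem.Set.add [m] m = [m] := by
      simp [PySem.Set.add, PySem.Set.contains]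
    rw [h]; exact ih

lemma pvOfList_rep_append (c : Nat) (hc : 1 ≤ c) (m : Int) (L : List Int) (hm : m ∉ L) :
    PySem.Set.ofList (List.replicate c m ++ L) = m :: PySem.Set.ofList L := by
  obtain ⟨c', rfl⟩ := Nat.exists_eq_add_of_le hc
  rw [PySem.Set.ofList_eq_foldl, PySem.Set.ofList_eq_foldl, List.foldl_append]
  have h1 : (List.replicate (1 + c') m).foldl PySem.Set.add [] = [m] := by
    rw [Nat.add_comm, List.replicate_succ]
    simp only [List.foldl_cons]
    have h : PySem.Set.add ([] : List Int) m = [m] := by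
      simp [PySem.Set.add, PySem.Set.contains]
    rw [h]; exact pvFoldl_add_rep c' m
  rw [h1]
  exact pvFoldl_add_cons L m [] hm (by simp)

lemma pvCount_grp (rest : List Int) : ∀ (m : Int) (c : Nat), 1 ≤ c →
    (PySem.Set.ofList (List.replicate c m ++ pvPmax m rest)).map
      (fun k => ((List.replicate c m ++ pvPmax m rest).count k : Int)) = pvGrp m (c : Int) rest := by
  induction rest with
  | nil =>
    intro m c hc
    have h := pvOfList_rep_append c hc m [] (by simp)
    rw [List.append_nil] at h
    rw [show pvPmax m [] = [] from rfl, List.append_nil, h]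
    simp [pvGrp, List.count_replicate]
  | cons d r ih =>
    intro m c hc
    by_cases h : m < d
    · have hpm : pvPmax m (d :: r) = d :: pvPmax d r := by simp [pvPmax, h]
      have hge : ∀ x ∈ d :: pvPmax d r, d ≤ x := by
        intro x hx
        rcases List.mem_cons.mp hx with rfl | hx
        · exact le_refl _
        · exact pvPmax_ge r d x hx
      have hm : m ∉ d :: pvPmax d r := fun hx => absurd (hge m hx) (not_le.mpr h)
      rw [hpm, pvOfList_rep_append c hc m _ hm, List.map_cons]
      have hcm : ((List.replicate c m ++ (d :: pvPmax d r)).count m : Int) = (c : Int) := by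
        rw [List.count_append, List.count_replicate, List.count_eq_zero_of_not_mem hm]
        simp
      have htl : (PySem.Set.ofList (d :: pvPmax d r)).map
          (fun k => ((List.replicate c m ++ (d :: pvPmax d r)).count k : Int)) =
          (PySem.Set.ofList (d :: pvPmax d r)).map
          (fun k => (((d :: pvPmax d r)).count k : Int)) := by
        apply List.map_congr_left
        intro k hk
        have hkL : k ∈ d :: pvPmax d r := (PySem.Set.mem_ofList _ _).mp hk
        have hkm : k ≠ m := fun hkm => hm (hkm ▸ hkL)
        rw [List.count_append, List.count_replicate]
        simp [Ne.symm hkm]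
      rw [hcm, htl]
      have hih := ih d 1 (le_refl 1)
      rw [show List.replicate 1 d ++ pvPmax d r = d :: pvPmax d r by simp] at hih
      rw [hih]
      simp [pvGrp, not_le.mpr h]
    · have hpm : pvPmax m (d :: r) = m :: pvPmax m r := by simp [pvPmax, h]
      have hrw : List.replicate c m ++ pvPmax m (d :: r)
          = List.replicate (c + 1) m ++ pvPmax m r := by
        rw [hpm, List.replicate_succ']
        simp
      rw [hrw, ih m (c + 1) (by omega)]
      have hcast : pvGrp m ((c : Int) + 1) r = pvGrp m (((c + 1 : Nat) : Int)) r := by push_cast; rfl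
      rw [show pvGrp m (c : Int) (d :: r) = pvGrp m ((c : Int) + 1) r by simp [pvGrp, not_lt.mp h],
          hcast]

lemma pvFoldl_stepA (rest : List Int) : ∀ (acc : List Int) (m : Int),
    rest.foldl
      (fun res d =>
        if PySem.List.pyGetD res (-1) 0 < d then res ++ [d]
        else res ++ [PySem.List.pyGetD res (-1) 0]) (acc ++ [m])
      = acc ++ m :: pvPmax m rest := by
  induction rest with
  | nil => intro acc m; simp [pvPmax]
  | cons d r ih =>
    intro acc m
    simp only [List.foldl_cons, PySem.List.pyGetD_neg_one_append_singleton]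
    by_cases h : m < d
    · rw [if_pos h, ih (acc ++ [m]) d]
      simp [pvPmax, h]
    · rw [if_neg h, ih (acc ++ [m]) m]
      simp [pvPmax, h]

def pvStepB (st : Int × Int × List Int) (d : Int) : Int × Int × List Int :=
  if d ≤ st.1 then (st.1, st.2.1 + 1, st.2.2) else (d, 1, st.2.2 ++ [st.2.1])

lemma pvFoldl_stepB (rest : List Int) : ∀ (front c : Int) (ans : List Int),
    (rest.foldl pvStepB (front, c, ans)).2.2 ++ [(rest.foldl pvStepB (front, c, ans)).2.1]
      = ans ++ pvGrp front c rest := by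
  induction rest with
  | nil => intro front c ans; simp [pvGrp]
  | cons d r ih =>
    intro front c ans
    simp only [List.foldl_cons]
    by_cases h : d ≤ front
    · rw [show pvStepB (front, c, ans) d = (front, c + 1, ans) by simp [pvStepB, h]]
      rw [ih front (c + 1) ans]
      simp [pvGrp, h]
    · rw [show pvStepB (front, c, ans) d = (d, 1, ans ++ [c]) by simp [pvStepB, h]]
      rw [ih d 1 (ans ++ [c])]
      simp [pvGrp, h]

lemma pvDays_eq (progresses speeds : List Int) (hlen : speeds.length ≤ progresses.length) :
    (PySem.List.pyRange 0 (PySem.List.len speeds)).foldl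
      (fun days i =>
        if PySem.Int.mod (100 - PySem.List.pyGetD progresses i 0) (PySem.List.pyGetD speeds i 0) ≠ 0 then
          days ++ [PySem.Int.floordiv (100 - PySem.List.pyGetD progresses i 0) (PySem.List.pyGetD speeds i 0) + 1]
        else
          days ++ [PySem.Int.floordiv (100 - PySem.List.pyGetD progresses i 0) (PySem.List.pyGetD speeds i 0)]) []
    = (progresses.zip speeds).map (fun ps => pvDay ps.1 ps.2) := by
  have hbody : (fun (days : List Int) (i : Int) =>
      if PySem.Int.mod (100 - PySem.List.pyGetD progresses i 0) (PySem.List.pyGetD speeds i 0) ≠ 0 then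
        days ++ [PySem.Int.floordiv (100 - PySem.List.pyGetD progresses i 0) (PySem.List.pyGetD speeds i 0) + 1]
      else
        days ++ [PySem.Int.floordiv (100 - PySem.List.pyGetD progresses i 0) (PySem.List.pyGetD speeds i 0)])
      = fun days i => days ++ [pvDay (PySem.List.pyGetD progresses i 0) (PySem.List.pyGetD speeds i 0)] := by
    funext days i
    unfold pvDay
    split <;> simp
  rw [hbody, PySem.List.foldl_append_singleton_eq_map, List.nil_append]
  have hlenS : PySem.List.len speeds = ((speeds.length : Nat) : Int) := by simp [PySem.List.len]
  rw [hlenS, PySem.List.pyRange_zero_natCast, List.map_map]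
  apply List.ext_getElem
  · simp [List.length_zip, Nat.min_eq_right hlen]
  · intro i h1 h2
    have hi : i < speeds.length := by simpa using h1
    have hip : i < progresses.length := lt_of_lt_of_le hi hlen
    simp only [List.getElem_map, List.getElem_range, Function.comp,
      PySem.List.pyGetD_natCast, List.getElem_zip]
    rw [List.getD_eq_getElem progresses 0 hip, List.getD_eq_getElem speeds 0 hi]

-- ===== VERDICT (by name: the statement is the Claim_ definition above) =====
theorem solution_spec : Claim_equal_solution := by
  intro progresses speeds _ hpre
  obtain ⟨hne, hlen, _⟩ := hpre
  have hDne : (progresses.zip speeds).map (fun ps => pvDay ps.1 ps.2) ≠ [] := by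
    intro h
    have hz := List.map_eq_nil_iff.mp h
    have hzl : (progresses.zip speeds).length = speeds.length := by
      rw [List.length_zip]; omega
    rw [hz] at hzl
    exact hne (List.length_eq_zero_iff.mp hzl.symm)
  obtain ⟨d0, rest, hcons⟩ := List.exists_cons_of_ne_nil hDne
  have hBside : solution_alt progresses speeds = pvGrp d0 1 rest := by
    simp only [solution_alt]
    rw [show (fun ps : Int × Int =>
        PySem.Int.floordiv (100 - ps.1) ps.2 +
          (if PySem.Int.mod (100 - ps.1) ps.2 ≠ 0 then (1 : Int) else 0))
        = (fun ps : Int × Int => pvDay ps.1 ps.2) from rfl]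
    rw [hcons]
    have hB := pvFoldl_stepB rest d0 1 []
    rw [List.nil_append] at hB
    exact hB
  have hAside : solution progresses speeds = pvGrp d0 1 rest := by
    simp only [solution]
    rw [pvDays_eq progresses speeds hlen, hcons]
    have hA := PySem.List.foldl_pyRange_pyGetD (d0 :: rest) 0
      (fun res dd =>
        if PySem.List.pyGetD res (-1) 0 < dd then res ++ [dd]
        else res ++ [PySem.List.pyGetD res (-1) 0])
      [PySem.List.pyGetD (d0 :: rest) 0 0] (a := 1) (by norm_num)
    beta_reduce at hA
    rw [hA]
    have h0 : PySem.List.pyGetD (d0 :: rest) 0 0 = d0 := by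
      simp
    rw [h0, show Int.toNat 1 = 1 from rfl, List.drop_one, List.tail_cons]
    have hAres := pvFoldl_stepA rest [] d0
    rw [List.nil_append] at hAres
    rw [hAres, List.nil_append]
    rw [show (PySem.Dict.counter (d0 :: pvPmax d0 rest)).values
        = ((PySem.Dict.counter (d0 :: pvPmax d0 rest)).items).map (fun x => x.2) from rfl,
      PySem.Dict.items_counter, List.map_map]
    have hcnt := pvCount_grp rest d0 1 (le_refl 1)
    rw [show List.replicate 1 d0 ++ pvPmax d0 rest = d0 :: pvPmax d0 rest by simp] at hcnt
    rw [show ((fun x : Int × Int => x.2) ∘ fun k => (k, ((d0 :: pvPmax d0 rest).count k : Int)))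
        = fun k => ((d0 :: pvPmax d0 rest).count k : Int) from rfl, hcnt, Nat.cast_one]
  unfold Spec_solution
  rw [hAside, hBside]
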